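-- pv_equiv track=rewrite | github.com/tang-xp/NLP_COMBINED_APP | xp/xp_pipeline.py | merge_temporal_entities
-- ===== SOURCE A (Python) =====
-- def merge_temporal_entities(structured_list):
--     """
--     Merges adjacent DATE and TIME entities into a single DATE_TIME entity.
--     Expects a list of dictionaries like [{'type': 'DATE', 'text': 'today'}, {'type': 'TIME', 'text': 'afternoon'}]
--     """
--     merged_list = []
--     i = 0
--     while i < len(structured_list):
--         entity = structured_list[i]
--
--         # Check for a DATE followed by a TIME
--         if entity['type'] == 'DATE' and i + 1 < len(structured_list) and structured_list[i+1]['type'] == 'TIME':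
--             combined_text = f"{entity['text']} {structured_list[i+1]['text']}"
--             merged_list.append({'type': 'DATE_TIME', 'text': combined_text})
--             i += 2  # Skip both entities
--         else:
--             merged_list.append(entity)
--             i += 1
--
--     # Convert back to dictionary format for the rest of the pipeline
--     final_dict = {}
--     for entity in merged_list:
--         if entity['type'] not in final_dict:
--             final_dict[entity['type']] = []
--         final_dict[entity['type']].append(entity['text'])
--
--     return final_dict
-- ===== SOURCE B (Python) =====
-- def merge_temporal_entities(structured_list):
--     """Single fused pass: writes merged entities straight into the result dict."""
--     final_dict = {}
--     i = 0
--     n = len(structured_list)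
--     while i < n:
--         e = structured_list[i]
--         if e['type'] == 'DATE' and i + 1 < n and structured_list[i + 1]['type'] == 'TIME':
--             final_dict.setdefault('DATE_TIME', []).append(f"{e['text']} {structured_list[i + 1]['text']}")
--             i += 2
--         else:
--             final_dict.setdefault(e['type'], []).append(e['text'])
--             i += 1
--     return final_dict
-- ===== Notes on version B (the rewrite author's own statement) =====
-- stated objective: simpler
-- what changed: Fuses A's two phases (build an intermediate merged_list, then aggregate it into a dict) into one pass that appends each text straight into the result dict via setdefault, dropping the intermediate list and the constructed DATE_TIME entity dicts.
import Mathlib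
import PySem

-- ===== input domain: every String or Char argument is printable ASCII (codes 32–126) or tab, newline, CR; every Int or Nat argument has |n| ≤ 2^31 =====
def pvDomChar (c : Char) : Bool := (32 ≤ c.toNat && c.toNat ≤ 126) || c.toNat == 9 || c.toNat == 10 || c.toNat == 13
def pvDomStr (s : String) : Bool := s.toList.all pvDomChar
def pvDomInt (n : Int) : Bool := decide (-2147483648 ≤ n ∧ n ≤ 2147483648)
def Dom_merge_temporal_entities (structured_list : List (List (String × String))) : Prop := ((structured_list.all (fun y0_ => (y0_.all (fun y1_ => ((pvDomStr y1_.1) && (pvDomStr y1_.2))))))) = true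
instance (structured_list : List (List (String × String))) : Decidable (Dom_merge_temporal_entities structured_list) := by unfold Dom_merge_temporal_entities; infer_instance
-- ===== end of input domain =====

-- B fuses A's two phases (intermediate merged_list, then aggregation into a dict) into one
-- pass that appends each text straight into the result dict; same return value.

-- entity[k]: first-match dict lookup (Pre_ guarantees the key is present, so getD "" never fires)
def entGet (e : List (String × String)) (k : String) : String :=
  ((e.find? (fun p => p.1 == k)).map (·.2)).getD ""

-- ===== PORT A =====
-- A's while loop building merged_list (i / i+1 indexing rendered as the two-cons pattern)
def mergeLoopA : List (List (String × String)) → List (List (String × String))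
  | [] => []
  | e :: [] => [e]
  | e :: e2 :: rest =>
    if entGet e "type" = "DATE" ∧ entGet e2 "type" = "TIME" then
      [("type", "DATE_TIME"), ("text", entGet e "text" ++ " " ++ entGet e2 "text")] :: mergeLoopA rest
    else
      e :: mergeLoopA (e2 :: rest)

-- A's aggregation step: `if t not in final_dict: final_dict[t] = []` then `final_dict[t].append(txt)`
def aggStepA (d : PySem.Dict String (List String)) (m : List (String × String)) :
    PySem.Dict String (List String) :=
  let t := entGet m "type"
  let d1 := if d.contains t then d else d.insert t []
  d1.modify t [] (fun l => l ++ [entGet m "text"])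

def merge_temporal_entities (structured_list : List (List (String × String))) : List (String × List String) :=
  ((mergeLoopA structured_list).foldl aggStepA PySem.Dict.empty).items

-- ===== PORT B =====
-- final_dict.setdefault(t, []).append(v)
def pushB (d : PySem.Dict String (List String)) (t v : String) : PySem.Dict String (List String) :=
  d.modify t [] (fun l => l ++ [v])

-- B's single fused while loop, writing straight into the dict
def fusedLoopB (d : PySem.Dict String (List String)) :
    List (List (String × String)) → PySem.Dict String (List String)
  | [] => d
  | e :: [] => pushB d (entGet e "type") (entGet e "text")
  | e :: e2 :: rest =>
    if entGet e "type" = "DATE" ∧ entGet e2 "type" = "TIME" then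
      fusedLoopB (pushB d "DATE_TIME" (entGet e "text" ++ " " ++ entGet e2 "text")) rest
    else
      fusedLoopB (pushB d (entGet e "type") (entGet e "text")) (e2 :: rest)

def merge_temporal_entities_alt (structured_list : List (List (String × String))) : List (String × List String) :=
  (fusedLoopB PySem.Dict.empty structured_list).items

-- ===== PRECONDITION & SPEC =====
-- Pre_ excludes exactly the inputs where an entity dict lacks the key 'type' or 'text':
-- there the Python A raises KeyError.
def Pre_merge_temporal_entities (structured_list : List (List (String × String))) : Prop :=
  (structured_list.all (fun e => e.any (fun p => p.1 == "type") && e.any (fun p => p.1 == "text"))) = true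
instance (structured_list : List (List (String × String))) : Decidable (Pre_merge_temporal_entities structured_list) := by unfold Pre_merge_temporal_entities; infer_instance

def pvWitness_merge_temporal_entities : (List (List (String × String))) :=
  [[("type", "DATE"), ("text", "today")], [("type", "TIME"), ("text", "noon")], [("type", "LOC"), ("text", "Paris")]]

def Spec_merge_temporal_entities (structured_list : List (List (String × String))) (out : List (String × List String)) : Prop := out = merge_temporal_entities_alt structured_list
instance (structured_list : List (List (String × String))) (out : List (String × List String)) : Decidable (Spec_merge_temporal_entities structured_list out) := by unfold Spec_merge_temporal_entities; infer_instance

-- ===== CLAIM (what is proved, stated in full; the proofs are below) =====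
def Claim_equal_merge_temporal_entities : Prop := ∀ (structured_list : List (List (String × String))), Dom_merge_temporal_entities structured_list → Pre_merge_temporal_entities structured_list → Spec_merge_temporal_entities structured_list (merge_temporal_entities structured_list)

-- ===== LEMMAS AND PROOFS =====

-- A's guarded aggregation step is B's setdefault-append push
theorem aggStepA_eq_pushB (d : PySem.Dict String (List String)) (m : List (String × String)) :
    aggStepA d m = pushB d (entGet m "type") (entGet m "text") := by
  unfold aggStepA pushB
  by_cases h : d.contains (entGet m "type")
  · simp [h]
  · simp only [Bool.not_eq_true] at h
    simp [h, PySem.Dict.modify, PySem.Dict.getD_insert_self, PySem.Dict.insert_insert_self,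
          PySem.Dict.getD_of_not_contains (h := h)]

-- reading 'type'/'text' off the synthesized DATE_TIME entity
theorem entGet_dt_type (c : String) :
    entGet [("type", "DATE_TIME"), ("text", c)] "type" = "DATE_TIME" := by
  simp [entGet]

theorem entGet_dt_text (c : String) :
    entGet [("type", "DATE_TIME"), ("text", c)] "text" = c := by
  simp [entGet]

-- folding A's aggregation over A's merged_list is B's fused loop
theorem foldl_mergeLoopA_eq_fusedLoopB (sl : List (List (String × String)))
    (d : PySem.Dict String (List String)) :
    (mergeLoopA sl).foldl aggStepA d = fusedLoopB d sl := by
  fun_induction mergeLoopA sl generalizing d with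
  | case1 => rfl
  | case2 e => simp [fusedLoopB, List.foldl, aggStepA_eq_pushB]
  | case3 e e2 rest h ih =>
    simp only [fusedLoopB, h.1, h.2, List.foldl, aggStepA_eq_pushB,
               entGet_dt_type, entGet_dt_text, ih, and_self, if_true]
  | case4 e e2 rest h ih =>
    simp only [fusedLoopB, if_neg h, List.foldl, aggStepA_eq_pushB, ih]

-- ===== VERDICT (by name: the statement is the Claim_ definition above) =====
theorem merge_temporal_entities_spec : Claim_equal_merge_temporal_entities := by
  intro sl _ _
  unfold Spec_merge_temporal_entities merge_temporal_entities merge_temporal_entities_alt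
  rw [foldl_mergeLoopA_eq_fusedLoopB]
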